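-- pv_equiv track=rewrite | github.com/konradreyhe/sacred-composer | sacred_composer/constraints.py | _step_in_scale
-- ===== SOURCE A (Python) =====
-- def _step_in_scale(pitch: int, direction: int, scale_pitches: list[int]) -> int:
--     sorted_scale = sorted(set(scale_pitches))
--     if direction > 0:
--         candidates = [p for p in sorted_scale if p > pitch]
--         return candidates[0] if candidates else pitch + 2
--     else:
--         candidates = [p for p in sorted_scale if p < pitch]
--         return candidates[-1] if candidates else pitch - 2
-- ===== SOURCE B (Python) =====
-- def _step_in_scale(pitch: int, direction: int, scale_pitches: list[int]) -> int:
--     if direction > 0: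
--         best = None
--         for p in scale_pitches:
--             if p > pitch and (best is None or p < best):
--                 best = p
--         return best if best is not None else pitch + 2
--     else:
--         best = None
--         for p in scale_pitches:
--             if p < pitch and (best is None or p > best):
--                 best = p
--         return best if best is not None else pitch - 2
-- ===== Notes on version B (the rewrite author's own statement) =====
-- stated objective: faster
-- what changed: Replaced sort-of-deduplicated-set plus filter-and-index with a single linear pass tracking the minimum element above (or maximum below) the pitch.
import Mathlib
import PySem

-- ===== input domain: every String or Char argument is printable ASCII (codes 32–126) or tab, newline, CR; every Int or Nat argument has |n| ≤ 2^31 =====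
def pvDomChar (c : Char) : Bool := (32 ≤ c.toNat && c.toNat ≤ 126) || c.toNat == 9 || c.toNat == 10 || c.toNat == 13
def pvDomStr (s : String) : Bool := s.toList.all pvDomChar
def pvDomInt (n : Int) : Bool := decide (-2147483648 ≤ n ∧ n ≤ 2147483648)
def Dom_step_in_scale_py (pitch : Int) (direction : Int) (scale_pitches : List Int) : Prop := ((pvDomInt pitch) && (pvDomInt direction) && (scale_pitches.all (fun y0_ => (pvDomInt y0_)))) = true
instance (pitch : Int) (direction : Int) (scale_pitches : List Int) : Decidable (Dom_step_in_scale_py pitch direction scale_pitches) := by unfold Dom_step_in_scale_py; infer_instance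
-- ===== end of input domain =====

-- B replaces A's sort-of-set + filter + index with one linear pass tracking the
-- nearest qualifying pitch (objective: faster, O(n) instead of O(n log n)).

-- ===== PORT A =====
def step_in_scale_py (pitch : Int) (direction : Int) (scale_pitches : List Int) : Int :=
  let sorted_scale := PySem.List.sorted (PySem.Set.ofList scale_pitches) (fun x => x) false
  if 0 < direction then
    let candidates := sorted_scale.filter (fun p => decide (pitch < p))
    if candidates ≠ [] then (PySem.List.pyGet? candidates 0).getD 0 else pitch + 2
  else
    let candidates := sorted_scale.filter (fun p => decide (p < pitch))
    if candidates ≠ [] then (PySem.List.pyGet? candidates (-1)).getD 0 else pitch - 2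

-- ===== PORT B =====
-- loop body of Source B's upward pass: keep the smallest element above pitch seen so far
def pvStepUp (pitch : Int) (acc : Option Int) (p : Int) : Option Int :=
  if pitch < p && (match acc with | none => true | some b => decide (p < b)) then some p else acc

-- loop body of Source B's downward pass: keep the largest element below pitch seen so far
def pvStepDn (pitch : Int) (acc : Option Int) (p : Int) : Option Int :=
  if p < pitch && (match acc with | none => true | some b => decide (b < p)) then some p else acc

def step_in_scale_py_alt (pitch : Int) (direction : Int) (scale_pitches : List Int) : Int :=
  if 0 < direction then
    match scale_pitches.foldl (pvStepUp pitch) none with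
    | some b => b
    | none => pitch + 2
  else
    match scale_pitches.foldl (pvStepDn pitch) none with
    | some b => b
    | none => pitch - 2

-- ===== PRECONDITION & SPEC =====
def Spec_step_in_scale_py (pitch : Int) (direction : Int) (scale_pitches : List Int) (out : Int) : Prop := out = step_in_scale_py_alt pitch direction scale_pitches
instance (pitch : Int) (direction : Int) (scale_pitches : List Int) (out : Int) : Decidable (Spec_step_in_scale_py pitch direction scale_pitches out) := by unfold Spec_step_in_scale_py; infer_instance

-- ===== CLAIM (what is proved, stated in full; the proofs are below) =====
def Claim_equal_step_in_scale_py : Prop := ∀ (pitch : Int) (direction : Int) (scale_pitches : List Int), Dom_step_in_scale_py pitch direction scale_pitches → Spec_step_in_scale_py pitch direction scale_pitches (step_in_scale_py pitch direction scale_pitches)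

-- ===== LEMMAS AND PROOFS =====

theorem stepUp_none (pitch p : Int) :
    pvStepUp pitch none p = if pitch < p then some p else none := by
  unfold pvStepUp; by_cases h : pitch < p <;> simp [h]

theorem stepUp_some (pitch b p : Int) :
    pvStepUp pitch (some b) p = if pitch < p ∧ p < b then some p else some b := by
  unfold pvStepUp
  by_cases h1 : pitch < p <;> by_cases h2 : p < b <;> simp [h1, h2]

theorem stepDn_none (pitch p : Int) :
    pvStepDn pitch none p = if p < pitch then some p else none := by
  unfold pvStepDn; by_cases h : p < pitch <;> simp [h]

theorem stepDn_some (pitch b p : Int) :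
    pvStepDn pitch (some b) p = if p < pitch ∧ b < p then some p else some b := by
  unfold pvStepDn
  by_cases h1 : p < pitch <;> by_cases h2 : b < p <;> simp [h1, h2]

-- characterisation of Source B's upward loop: the fold yields the least element above pitch
theorem foldUp_spec (pitch : Int) : ∀ (xs : List Int) (acc : Option Int),
    (∀ b, acc = some b → pitch < b) →
    match xs.foldl (pvStepUp pitch) acc with
    | none => acc = none ∧ ∀ p ∈ xs, ¬ pitch < p
    | some m => pitch < m ∧ (m ∈ xs ∨ acc = some m) ∧ (∀ p ∈ xs, pitch < p → m ≤ p) ∧ (∀ c, acc = some c → m ≤ c) := by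
  intro xs
  induction xs with
  | nil =>
    intro acc hacc
    cases acc with
    | none => simp
    | some b =>
      simp only [List.foldl_nil]
      refine ⟨hacc b rfl, ?_, ?_, ?_⟩
      · right; trivial
      · intro p hp; simp at hp
      · intro c hc; cases hc; exact le_refl _
  | cons x xs ih =>
    intro acc hacc
    simp only [List.foldl_cons]
    cases acc with
    | none =>
      rw [stepUp_none]
      by_cases hx : pitch < x
      · rw [if_pos hx]
        have key := ih (some x) (by intro b hb; cases hb; exact hx)
        cases hr : xs.foldl (pvStepUp pitch) (some x) with
        | none => rw [hr] at key; exact absurd key.1 (by simp)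
        | some m =>
          rw [hr] at key
          obtain ⟨hm1, hm2, hm3, hm4⟩ := key
          refine ⟨hm1, ?_, ?_, by simp⟩
          · rcases hm2 with h | h
            · exact Or.inl (List.mem_cons_of_mem x h)
            · cases h; exact Or.inl (List.mem_cons_self ..)
          · intro p hp hplt
            rcases List.mem_cons.mp hp with h | h
            · cases h; exact hm4 _ rfl
            · exact hm3 p h hplt
      · rw [if_neg hx]
        have key := ih none (by simp)
        cases hr : xs.foldl (pvStepUp pitch) none with
        | none =>
          rw [hr] at key
          refine ⟨rfl, ?_⟩
          intro p hp
          rcases List.mem_cons.mp hp with h | h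
          · cases h; exact hx
          · exact key.2 p h
        | some m =>
          rw [hr] at key
          obtain ⟨hm1, hm2, hm3, hm4⟩ := key
          refine ⟨hm1, ?_, ?_, by simp⟩
          · rcases hm2 with h | h
            · exact Or.inl (List.mem_cons_of_mem x h)
            · simp at h
          · intro p hp hplt
            rcases List.mem_cons.mp hp with h | h
            · cases h; exact absurd hplt hx
            · exact hm3 p h hplt
    | some b =>
      have hb : pitch < b := hacc b rfl
      rw [stepUp_some]
      by_cases hx : pitch < x ∧ x < b
      · rw [if_pos hx]
        have key := ih (some x) (by intro c hc; cases hc; exact hx.1)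
        cases hr : xs.foldl (pvStepUp pitch) (some x) with
        | none => rw [hr] at key; exact absurd key.1 (by simp)
        | some m =>
          rw [hr] at key
          obtain ⟨hm1, hm2, hm3, hm4⟩ := key
          have hmx : m ≤ x := hm4 x rfl
          refine ⟨hm1, ?_, ?_, ?_⟩
          · rcases hm2 with h | h
            · exact Or.inl (List.mem_cons_of_mem x h)
            · cases h; exact Or.inl (List.mem_cons_self ..)
          · intro p hp hplt
            rcases List.mem_cons.mp hp with h | h
            · cases h; exact hmx
            · exact hm3 p h hplt
          · intro c hc; cases hc; omega
      · rw [if_neg hx]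
        have key := ih (some b) (by intro c hc; cases hc; exact hb)
        cases hr : xs.foldl (pvStepUp pitch) (some b) with
        | none => rw [hr] at key; exact absurd key.1 (by simp)
        | some m =>
          rw [hr] at key
          obtain ⟨hm1, hm2, hm3, hm4⟩ := key
          have hmb : m ≤ b := hm4 b rfl
          refine ⟨hm1, ?_, ?_, ?_⟩
          · rcases hm2 with h | h
            · exact Or.inl (List.mem_cons_of_mem x h)
            · exact Or.inr h
          · intro p hp hplt
            rcases List.mem_cons.mp hp with h | h
            · cases h; omega
            · exact hm3 p h hplt
          · intro c hc; cases hc; exact hmb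

-- characterisation of Source B's downward loop: the fold yields the greatest element below pitch
theorem foldDn_spec (pitch : Int) : ∀ (xs : List Int) (acc : Option Int),
    (∀ b, acc = some b → b < pitch) →
    match xs.foldl (pvStepDn pitch) acc with
    | none => acc = none ∧ ∀ p ∈ xs, ¬ p < pitch
    | some m => m < pitch ∧ (m ∈ xs ∨ acc = some m) ∧ (∀ p ∈ xs, p < pitch → p ≤ m) ∧ (∀ c, acc = some c → c ≤ m) := by
  intro xs
  induction xs with
  | nil =>
    intro acc hacc
    cases acc with
    | none => simp
    | some b =>
      simp only [List.foldl_nil]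
      refine ⟨hacc b rfl, ?_, ?_, ?_⟩
      · right; trivial
      · intro p hp; simp at hp
      · intro c hc; cases hc; exact le_refl _
  | cons x xs ih =>
    intro acc hacc
    simp only [List.foldl_cons]
    cases acc with
    | none =>
      rw [stepDn_none]
      by_cases hx : x < pitch
      · rw [if_pos hx]
        have key := ih (some x) (by intro b hb; cases hb; exact hx)
        cases hr : xs.foldl (pvStepDn pitch) (some x) with
        | none => rw [hr] at key; exact absurd key.1 (by simp)
        | some m =>
          rw [hr] at key
          obtain ⟨hm1, hm2, hm3, hm4⟩ := key
          refine ⟨hm1, ?_, ?_, by simp⟩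
          · rcases hm2 with h | h
            · exact Or.inl (List.mem_cons_of_mem x h)
            · cases h; exact Or.inl (List.mem_cons_self ..)
          · intro p hp hplt
            rcases List.mem_cons.mp hp with h | h
            · cases h; exact hm4 _ rfl
            · exact hm3 p h hplt
      · rw [if_neg hx]
        have key := ih none (by simp)
        cases hr : xs.foldl (pvStepDn pitch) none with
        | none =>
          rw [hr] at key
          refine ⟨rfl, ?_⟩
          intro p hp
          rcases List.mem_cons.mp hp with h | h
          · cases h; exact hx
          · exact key.2 p h
        | some m =>
          rw [hr] at key
          obtain ⟨hm1, hm2, hm3, hm4⟩ := key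
          refine ⟨hm1, ?_, ?_, by simp⟩
          · rcases hm2 with h | h
            · exact Or.inl (List.mem_cons_of_mem x h)
            · simp at h
          · intro p hp hplt
            rcases List.mem_cons.mp hp with h | h
            · cases h; exact absurd hplt hx
            · exact hm3 p h hplt
    | some b =>
      have hb : b < pitch := hacc b rfl
      rw [stepDn_some]
      by_cases hx : x < pitch ∧ b < x
      · rw [if_pos hx]
        have key := ih (some x) (by intro c hc; cases hc; exact hx.1)
        cases hr : xs.foldl (pvStepDn pitch) (some x) with
        | none => rw [hr] at key; exact absurd key.1 (by simp)
        | some m =>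
          rw [hr] at key
          obtain ⟨hm1, hm2, hm3, hm4⟩ := key
          have hmx : x ≤ m := hm4 x rfl
          refine ⟨hm1, ?_, ?_, ?_⟩
          · rcases hm2 with h | h
            · exact Or.inl (List.mem_cons_of_mem x h)
            · cases h; exact Or.inl (List.mem_cons_self ..)
          · intro p hp hplt
            rcases List.mem_cons.mp hp with h | h
            · cases h; exact hmx
            · exact hm3 p h hplt
          · intro c hc; cases hc; omega
      · rw [if_neg hx]
        have key := ih (some b) (by intro c hc; cases hc; exact hb)
        cases hr : xs.foldl (pvStepDn pitch) (some b) with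
        | none => rw [hr] at key; exact absurd key.1 (by simp)
        | some m =>
          rw [hr] at key
          obtain ⟨hm1, hm2, hm3, hm4⟩ := key
          have hmb : b ≤ m := hm4 b rfl
          refine ⟨hm1, ?_, ?_, ?_⟩
          · rcases hm2 with h | h
            · exact Or.inl (List.mem_cons_of_mem x h)
            · exact Or.inr h
          · intro p hp hplt
            rcases List.mem_cons.mp hp with h | h
            · cases h; omega
            · exact hm3 p h hplt
          · intro c hc; cases hc; exact hmb

-- in a strictly increasing list the first element is the least
theorem head_pairwise_le (l : List Int) (h : Int) (t : List Int)
    (heq : l = h :: t) (hp : l.Pairwise (· < ·)) : ∀ x ∈ l, h ≤ x := by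
  subst heq
  intro x hx
  rcases List.mem_cons.mp hx with h1 | h1
  · exact le_of_eq h1.symm
  · exact le_of_lt ((List.pairwise_cons.mp hp).1 x h1)

-- in a strictly increasing list the last element is the greatest
theorem getLast?_pairwise_ge : ∀ (l : List Int) (m : Int),
    l.getLast? = some m → l.Pairwise (· < ·) → ∀ x ∈ l, x ≤ m := by
  intro l
  induction l with
  | nil => intro m hm; simp at hm
  | cons a t ih =>
    intro m hm hp x hx
    cases t with
    | nil =>
      simp at hm hx
      omega
    | cons b t' =>
      have hm' : (b :: t').getLast? = some m := by
        rw [List.getLast?_cons_cons] at hm; exact hm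
      have hp' := (List.pairwise_cons.mp hp).2
      rcases List.mem_cons.mp hx with h1 | h1
      · have hbm : b ≤ m := ih m hm' hp' b (List.mem_cons_self ..)
        have hab : a < b := (List.pairwise_cons.mp hp).1 b (List.mem_cons_self ..)
        omega
      · exact ih m hm' hp' x h1

-- ===== VERDICT (by name: the statement is the Claim_ definition above) =====
theorem step_in_scale_py_spec : Claim_equal_step_in_scale_py := by
  intro pitch direction scale_pitches _
  unfold Spec_step_in_scale_py
  simp only [step_in_scale_py, step_in_scale_py_alt]
  have hpair : (PySem.List.sorted (PySem.Set.ofList scale_pitches) (fun x => x) false).Pairwise (· < ·) :=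
    PySem.List.sorted_ofList_pairwise_lt scale_pitches
  set s := PySem.List.sorted (PySem.Set.ofList scale_pitches) (fun x => x) false with hs
  have hmem : ∀ p : Int, p ∈ s ↔ p ∈ scale_pitches := by
    intro p
    rw [hs, PySem.List.mem_sorted, PySem.Set.mem_ofList]
  by_cases hdir : 0 < direction
  · rw [if_pos hdir, if_pos hdir]
    have keyB := foldUp_spec pitch scale_pitches none (by simp)
    cases hc : s.filter (fun p => decide (pitch < p)) with
    | nil =>
      have hnone : ∀ p ∈ scale_pitches, ¬ pitch < p := by
        intro p hp
        have := (List.filter_eq_nil_iff.mp hc) p ((hmem p).mpr hp)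
        simpa using this
      cases hr : scale_pitches.foldl (pvStepUp pitch) none with
      | none => simp
      | some m =>
        rw [hr] at keyB
        obtain ⟨hm1, hm2, _, _⟩ := keyB
        rcases hm2 with h | h
        · exact absurd hm1 (hnone m h)
        · simp at h
    | cons h t =>
      have hin : h ∈ s.filter (fun p => decide (pitch < p)) := by rw [hc]; exact List.mem_cons_self ..
      have hhp := List.mem_filter.mp hin
      have hhlt : pitch < h := by simpa using hhp.2
      have hhmem : h ∈ scale_pitches := (hmem h).mp hhp.1
      have hfp : (s.filter (fun p => decide (pitch < p))).Pairwise (· < ·) :=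
        List.Pairwise.sublist (List.filter_sublist ..) hpair
      have hmin : ∀ p ∈ scale_pitches, pitch < p → h ≤ p := by
        intro p hp hlt
        have hpf : p ∈ s.filter (fun q => decide (pitch < q)) :=
          List.mem_filter.mpr ⟨(hmem p).mpr hp, by simpa using hlt⟩
        exact head_pairwise_le _ h t hc hfp p hpf
      cases hr : scale_pitches.foldl (pvStepUp pitch) none with
      | none =>
        rw [hr] at keyB
        exact absurd hhlt (keyB.2 h hhmem)
      | some m =>
        rw [hr] at keyB
        obtain ⟨hm1, hm2, hm3, _⟩ := keyB
        rcases hm2 with hmm | hmm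
        · have h1 : h ≤ m := hmin m hmm hm1
          have h2 : m ≤ h := hm3 h hhmem hhlt
          have : m = h := le_antisymm h2 h1
          subst this
          simp
        · simp at hmm
  · rw [if_neg hdir, if_neg hdir]
    have keyB := foldDn_spec pitch scale_pitches none (by simp)
    cases hc : s.filter (fun p => decide (p < pitch)) with
    | nil =>
      have hnone : ∀ p ∈ scale_pitches, ¬ p < pitch := by
        intro p hp
        have := (List.filter_eq_nil_iff.mp hc) p ((hmem p).mpr hp)
        simpa using this
      cases hr : scale_pitches.foldl (pvStepDn pitch) none with
      | none => simp
      | some m =>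
        rw [hr] at keyB
        obtain ⟨hm1, hm2, _, _⟩ := keyB
        rcases hm2 with h | h
        · exact absurd hm1 (hnone m h)
        · simp at h
    | cons h t =>
      have hfp : (s.filter (fun p => decide (p < pitch))).Pairwise (· < ·) :=
        List.Pairwise.sublist (List.filter_sublist ..) hpair
      obtain ⟨g, hg⟩ : ∃ g, (s.filter (fun p => decide (p < pitch))).getLast? = some g := by
        rw [hc]; exact ⟨(h :: t).getLast (by simp), List.getLast?_eq_some_getLast _⟩
      have hgin : g ∈ s.filter (fun p => decide (p < pitch)) := List.mem_of_getLast? hg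
      have hgf := List.mem_filter.mp hgin
      have hglt : g < pitch := by simpa using hgf.2
      have hgmem : g ∈ scale_pitches := (hmem g).mp hgf.1
      have hmax : ∀ p ∈ scale_pitches, p < pitch → p ≤ g := by
        intro p hp hlt
        have hpf : p ∈ s.filter (fun q => decide (q < pitch)) :=
          List.mem_filter.mpr ⟨(hmem p).mpr hp, by simpa using hlt⟩
        exact getLast?_pairwise_ge _ g hg hfp p hpf
      cases hr : scale_pitches.foldl (pvStepDn pitch) none with
      | none =>
        rw [hr] at keyB
        exact absurd hglt (keyB.2 g hgmem)
      | some m =>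
        rw [hr] at keyB
        obtain ⟨hm1, hm2, hm3, _⟩ := keyB
        rcases hm2 with hmm | hmm
        · have h1 : m ≤ g := hmax m hmm hm1
          have h2 : g ≤ m := hm3 g hgmem hglt
          have : m = g := le_antisymm h1 h2
          subst this
          rw [hc] at hg
          simp [PySem.List.pyGet?_neg_one, hg]
        · simp at hmm
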